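-- pv_equiv track=rewrite | github.com/HeroSima43/Python | Seminar5/task2.py | nextmax
-- ===== SOURCE A (Python) =====
-- def nextmax(my_list):
--     max = my_list[0]
--     res = [my_list[0]]
--     for i in range(len(my_list)):
--         if my_list[i] > max:
--             max = my_list[i]
--             res.append(max)
--
--     return res
-- ===== SOURCE B (Python) =====
-- def nextmax(my_list):
--     # pass 1: running-maximum sequence (one value per element)
--     m = my_list[0]
--     running = [m]
--     for x in my_list[1:]:
--         m = m if m > x else x
--         running.append(m)
--     # pass 2: collapse runs of consecutive equal values
--     out = [running[0]]
--     for v in running[1:]: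
--         if v != out[-1]:
--             out.append(v)
--     return out
-- ===== Notes on version B (the rewrite author's own statement) =====
-- stated objective: alternative
-- what changed: Replaces A's single maintain-and-append loop with two passes: compute the full running-maximum sequence, then collapse runs of consecutive equal values.
import Mathlib
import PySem

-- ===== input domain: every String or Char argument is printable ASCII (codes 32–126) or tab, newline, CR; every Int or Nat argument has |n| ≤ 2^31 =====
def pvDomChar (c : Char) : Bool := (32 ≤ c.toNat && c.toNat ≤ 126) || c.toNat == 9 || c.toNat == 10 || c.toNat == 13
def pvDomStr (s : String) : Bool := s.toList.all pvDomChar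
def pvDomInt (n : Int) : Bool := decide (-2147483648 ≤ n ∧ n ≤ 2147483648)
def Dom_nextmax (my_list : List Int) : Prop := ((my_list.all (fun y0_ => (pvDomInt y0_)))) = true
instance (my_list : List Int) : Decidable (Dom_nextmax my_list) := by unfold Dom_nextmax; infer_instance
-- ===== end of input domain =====

-- B replaces A's single maintain-and-append loop with two passes (running maxima, then
-- collapse consecutive duplicates); same O(n) cost, different decomposition (objective: alternative).


-- ===== PORT A =====
-- A: max = my_list[0]; res = [my_list[0]]; for each element, if it exceeds max, update and append.
def nextmax (my_list : List Int) : List Int :=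
  match my_list with
  | [] => []  -- unreachable under Pre_nextmax (Python raises IndexError reading the first element)
  | h :: _ =>
    (my_list.foldl
      (fun (p : Int × List Int) x => if x > p.1 then (x, p.2 ++ [x]) else p)
      (h, [h])).2

-- ===== PORT B =====
-- pass 1 of Source B: running-maximum sequence of the tail given current max m
def runPass (m : Int) : List Int → List Int
  | [] => []
  | x :: xs => let m' := if m > x then m else x; m' :: runPass m' xs

-- pass 2 of Source B: collapse runs of consecutive equal values (prev = last kept value)
def dedupPass (prev : Int) : List Int → List Int
  | [] => []
  | v :: vs => if v ≠ prev then v :: dedupPass v vs else dedupPass prev vs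

def nextmax_alt (my_list : List Int) : List Int :=
  match my_list with
  | [] => []  -- unreachable under Pre_nextmax (Source B raises IndexError reading the first element)
  | h :: t => h :: dedupPass h (runPass h t)

-- ===== PRECONDITION & SPEC =====
-- Pre_ excludes only the empty list, on which both Pythons raise IndexError reading the first element.
def Pre_nextmax (my_list : List Int) : Prop := my_list ≠ []
instance (my_list : List Int) : Decidable (Pre_nextmax my_list) := by unfold Pre_nextmax; infer_instance
def pvWitness_nextmax : List Int := [1, 3, 2, 5]
def Spec_nextmax (my_list : List Int) (out : List Int) : Prop := out = nextmax_alt my_list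
instance (my_list : List Int) (out : List Int) : Decidable (Spec_nextmax my_list out) := by unfold Spec_nextmax; infer_instance

-- ===== CLAIM (what is proved, stated in full; the proofs are below) =====
def Claim_equal_nextmax : Prop := ∀ (my_list : List Int), Dom_nextmax my_list → Pre_nextmax my_list → Spec_nextmax my_list (nextmax my_list)

-- ===== LEMMAS AND PROOFS =====

-- Invariant relating A's fold state to B's two passes.
theorem fold_eq_passes (t : List Int) (m : Int) (res : List Int) :
    (t.foldl (fun (p : Int × List Int) x => if x > p.1 then (x, p.2 ++ [x]) else p)
      (m, res)).2 = res ++ dedupPass m (runPass m t) := by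
  induction t generalizing m res with
  | nil => simp [runPass, dedupPass]
  | cons x xs ih =>
    simp only [List.foldl_cons, runPass]
    by_cases h : x > m
    · have hm' : (if m > x then m else x) = x := by omega
      rw [if_pos h, hm']
      have hne : x ≠ m := by omega
      simp [dedupPass, hne, ih, List.append_assoc]
    · have hm' : (if m > x then m else x) = m := by omega
      rw [if_neg h, hm']
      simp [dedupPass, ih]

-- ===== VERDICT (by name: the statement is the Claim_ definition above) =====
theorem nextmax_spec : Claim_equal_nextmax := by
  intro l _ hpre
  match l with
  | [] => exact absurd rfl hpre
  | h :: t =>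
    show nextmax (h :: t) = nextmax_alt (h :: t)
    simp only [nextmax, nextmax_alt, fold_eq_passes, runPass]
    simp [dedupPass]
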